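-- pv_equiv track=rewrite | github.com/TVunico/IP_2425 | IP_2425_7/B.py | hat_tricks
-- ===== SOURCE A (Python) =====
-- def hat_tricks(grupos_jogos , golos_jogo):
--     c = 0
--     n = 0
--     golos_grupo = []
--     for i in range (0 , len(golos_jogo)):
--         if golos_jogo[i] >= 3:
--             n += 1
--         c += 1
--         if c >= grupos_jogos:
--             golos_grupo.append(n)
--             c = 0
--             n = 0
--     if c > 0:
--         golos_grupo.append(n)
--     return golos_grupo
-- ===== SOURCE B (Python) =====
-- def hat_tricks(grupos_jogos, golos_jogo):
--     res = []
--     while golos_jogo: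
--         chunk = golos_jogo[:grupos_jogos]
--         golos_jogo = golos_jogo[grupos_jogos:]
--         res.append(sum(g >= 3 for g in chunk))
--     return res
-- ===== Notes on version B (the rewrite author's own statement) =====
-- stated objective: simpler
-- what changed: Replaced A's index loop with a running counter and per-group reset by a while loop that slices off one chunk at a time and appends the chunk's count of games with >= 3 goals; the trailing partial chunk is handled by slicing automatically.
-- outside the precondition, e.g. on hat_tricks(0, [3, 1]): A returns [1, 0], B does not finish within the time limit; on hat_tricks(-2, [3, 1]): A returns [1, 0], B does not finish within the time limit
import Mathlib
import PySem

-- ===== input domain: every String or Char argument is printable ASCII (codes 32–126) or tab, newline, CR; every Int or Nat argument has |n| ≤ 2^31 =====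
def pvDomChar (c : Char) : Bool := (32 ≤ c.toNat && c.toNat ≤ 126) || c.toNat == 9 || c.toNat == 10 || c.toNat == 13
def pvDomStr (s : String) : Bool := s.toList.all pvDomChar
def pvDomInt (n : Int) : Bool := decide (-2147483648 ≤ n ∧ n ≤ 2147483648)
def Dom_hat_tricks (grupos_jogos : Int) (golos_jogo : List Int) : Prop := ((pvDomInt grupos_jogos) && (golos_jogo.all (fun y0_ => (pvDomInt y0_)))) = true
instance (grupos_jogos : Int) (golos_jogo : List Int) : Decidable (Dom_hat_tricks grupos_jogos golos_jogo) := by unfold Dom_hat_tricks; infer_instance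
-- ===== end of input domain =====

-- B replaces A's running counter with per-group reset by a while loop slicing off one chunk
-- at a time and counting each chunk; objective: simpler.

-- ===== PORT A =====
def hat_tricks (grupos_jogos : Int) (golos_jogo : List Int) : List Int :=
  let s := (PySem.List.pyRange 0 golos_jogo.length 1).foldl
    (fun (st : Int × Int × List Int) i =>
      let c := st.1; let n := st.2.1; let gg := st.2.2
      let n := if PySem.List.pyGetD golos_jogo i 0 ≥ 3 then n + 1 else n
      let c := c + 1
      if c ≥ grupos_jogos then (0, 0, gg ++ [n]) else (c, n, gg))
    (0, 0, [])
  if s.1 > 0 then s.2.2 ++ [s.2.1] else s.2.2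

-- ===== PORT B =====
-- sum(g >= 3 for g in chunk)
def pvCount3 (chunk : List Int) : Int :=
  chunk.foldl (fun a g => a + (if g ≥ 3 then 1 else 0)) 0

-- the while loop of Source B: slice off golos_jogo[:grupos_jogos], recurse on golos_jogo[grupos_jogos:].
-- The tail 'rest.drop (grupos_jogos - 1).toNat' equals (x :: rest)[grupos_jogos:] for
-- grupos_jogos ≥ 1 (Pre_; the Python loop does not terminate otherwise), written this way
-- so the recursion is visibly decreasing.
def pvAltGo (grupos_jogos : Int) : List Int → List Int
  | [] => []
  | x :: rest =>
      pvCount3 (PySem.List.slice (x :: rest) none (some grupos_jogos)) ::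
        pvAltGo grupos_jogos (rest.drop (grupos_jogos - 1).toNat)
termination_by xs => xs.length
decreasing_by simp

def hat_tricks_alt (grupos_jogos : Int) (golos_jogo : List Int) : List Int :=
  pvAltGo grupos_jogos golos_jogo

-- ===== PRECONDITION & SPEC =====
-- Pre_ excludes non-positive group sizes: there A's one-count-per-element output is an
-- artefact of its counter resetting immediately, while B's slicing loop never shrinks the
-- list and diverges.
def Pre_hat_tricks (grupos_jogos : Int) (golos_jogo : List Int) : Prop := 1 ≤ grupos_jogos
instance (grupos_jogos : Int) (golos_jogo : List Int) : Decidable (Pre_hat_tricks grupos_jogos golos_jogo) := by unfold Pre_hat_tricks; infer_instance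

def pvWitness_hat_tricks : Int × List Int := (3, [1, 3, 4, 0, 5])

def Spec_hat_tricks (grupos_jogos : Int) (golos_jogo : List Int) (out : List Int) : Prop := out = hat_tricks_alt grupos_jogos golos_jogo
instance (grupos_jogos : Int) (golos_jogo : List Int) (out : List Int) : Decidable (Spec_hat_tricks grupos_jogos golos_jogo out) := by unfold Spec_hat_tricks; infer_instance

-- ===== CLAIM (what is proved, stated in full; the proofs are below) =====
def Claim_equal_hat_tricks : Prop := ∀ (grupos_jogos : Int) (golos_jogo : List Int), Dom_hat_tricks grupos_jogos golos_jogo → Pre_hat_tricks grupos_jogos golos_jogo → Spec_hat_tricks grupos_jogos golos_jogo (hat_tricks grupos_jogos golos_jogo)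

-- ===== LEMMAS AND PROOFS =====

-- A's loop body, as a step function over the elements themselves
def pvStep (gj : Int) (st : Int × Int × List Int) (g : Int) : Int × Int × List Int :=
  let c := st.1; let n := st.2.1; let acc := st.2.2
  let n := if g ≥ 3 then n + 1 else n
  let c := c + 1
  if c ≥ gj then (0, 0, acc ++ [n]) else (c, n, acc)

def pvFinish (st : Int × Int × List Int) : List Int :=
  if st.1 > 0 then st.2.2 ++ [st.2.1] else st.2.2

lemma pvCount3_eq (l : List Int) :
    pvCount3 l = (l.map (fun g => if g ≥ 3 then (1 : Int) else 0)).sum := by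
  simpa [pvCount3] using PySem.List.foldl_add l (fun g => if g ≥ 3 then (1 : Int) else 0) 0

lemma pvCount3_cons (x : Int) (l : List Int) :
    pvCount3 (x :: l) = (if x ≥ 3 then 1 else 0) + pvCount3 l := by
  simp [pvCount3_eq]

-- (i) no reset occurs while c stays below gj
lemma pvFoldl_no_reset (gj : Int) (l : List Int) (c0 n0 : Int) (acc : List Int)
    (h0 : 0 ≤ c0) (h : c0 + l.length < gj) :
    l.foldl (pvStep gj) (c0, n0, acc) = (c0 + l.length, n0 + pvCount3 l, acc) := by
  induction l generalizing c0 n0 with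
  | nil => simp [pvCount3]
  | cons x xs ih =>
      simp only [List.length_cons] at h
      have hlt : ¬ (c0 + 1 ≥ gj) := by push_cast at h; omega
      simp only [List.foldl_cons, pvStep, hlt, if_false]
      rw [ih (c0 + 1) _ (by omega) (by push_cast at h ⊢; omega)]
      refine Prod.ext ?_ (Prod.ext ?_ rfl)
      · simp only [List.length_cons]; push_cast; ring
      · simp only [pvCount3_cons]; split_ifs <;> omega

-- (ii) a chunk of exactly gj elements resets the state and appends its count
lemma pvFoldl_chunk (gj : Int) (l : List Int) (acc : List Int)
    (h1 : 1 ≤ gj) (h : (l.length : Int) = gj) :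
    l.foldl (pvStep gj) (0, 0, acc) = (0, 0, acc ++ [pvCount3 l]) := by
  rcases List.eq_nil_or_concat l with rfl | ⟨l', x, rfl⟩
  · simp at h; omega
  · rw [List.concat_eq_append, List.foldl_append]
    simp only [List.concat_eq_append, List.length_append, List.length_cons,
      List.length_nil] at h
    rw [pvFoldl_no_reset gj l' 0 0 acc le_rfl (by push_cast at h ⊢; omega)]
    have hge : (0 : Int) + l'.length + 1 ≥ gj := by push_cast at h ⊢; omega
    simp only [List.foldl_cons, List.foldl_nil, pvStep, hge, if_pos]
    refine Prod.ext rfl (Prod.ext rfl ?_)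
    simp only [pvCount3_eq, List.map_append, List.sum_append, List.map_cons,
      List.map_nil, List.sum_cons, List.sum_nil]
    split_ifs <;> simp

-- main invariant: A's fold-and-finish, started from a fresh state, produces acc ++ B's chunks
lemma pvMain (gj : Int) (h1 : 1 ≤ gj) (xs : List Int) (acc : List Int) :
    pvFinish (xs.foldl (pvStep gj) (0, 0, acc)) = acc ++ pvAltGo gj xs := by
  by_cases hlen : (xs.length : Int) < gj
  · rw [pvFoldl_no_reset gj xs 0 0 acc le_rfl (by omega)]
    cases xs with
    | nil => simp [pvFinish, pvAltGo]
    | cons x rest =>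
        have hdrop : rest.drop (gj - 1).toNat = [] := by
          apply List.drop_eq_nil_of_le
          simp only [List.length_cons] at hlen; push_cast at hlen; omega
        have hslice : PySem.List.slice (x :: rest) none (some gj) = x :: rest := by
          have h0 : gj = ((gj.toNat : Nat) : Int) := by omega
          rw [h0, PySem.List.slice_to_natCast]
          apply List.take_of_length_le
          simp only [List.length_cons] at hlen ⊢; omega
        rw [pvAltGo, hdrop, pvAltGo, hslice]
        simp only [pvFinish, List.length_cons]
        rw [if_pos (by push_cast; omega)]
        simp
  · rw [not_lt] at hlen
    cases xs with
    | nil => simp at hlen; omega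
    | cons x rest =>
        have hsplit : x :: rest = (x :: rest).take gj.toNat ++ (x :: rest).drop gj.toNat :=
          (List.take_append_drop _ _).symm
        have hlentake : (((x :: rest).take gj.toNat).length : Int) = gj := by
          simp only [List.length_cons] at hlen
          simp only [List.length_take, List.length_cons]
          omega
        conv_lhs => rw [hsplit]
        rw [List.foldl_append, pvFoldl_chunk gj _ acc h1 hlentake]
        have hdroplt : ((x :: rest).drop gj.toNat).length < (x :: rest).length := by
          simp only [List.length_drop, List.length_cons]
          simp only [List.length_cons] at hlen
          omega
        rw [pvMain gj h1 ((x :: rest).drop gj.toNat) (acc ++ [pvCount3 ((x :: rest).take gj.toNat)])]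
        have hslice : PySem.List.slice (x :: rest) none (some gj) = (x :: rest).take gj.toNat := by
          have h0 : gj = ((gj.toNat : Nat) : Int) := by omega
          rw [h0, PySem.List.slice_to_natCast]
          have : (max gj 0).toNat = gj.toNat := by omega
          simp [this]
        have hdrop : rest.drop (gj - 1).toNat = (x :: rest).drop gj.toNat := by
          have h0 : gj.toNat = (gj - 1).toNat + 1 := by omega
          rw [h0, List.drop_succ_cons]
        conv_rhs => rw [pvAltGo, hslice, hdrop]
        simp
termination_by xs.length

-- ===== VERDICT (by name: the statement is the Claim_ definition above) =====
theorem hat_tricks_spec : Claim_equal_hat_tricks := by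
  intro gj xs _ hpre
  unfold Spec_hat_tricks hat_tricks hat_tricks_alt
  show pvFinish ((PySem.List.pyRange 0 (PySem.List.len xs) 1).foldl
      (fun st i => pvStep gj st (PySem.List.pyGetD xs i 0)) (0, 0, [])) = pvAltGo gj xs
  rw [PySem.List.foldl_pyRange_zero_pyGetD xs 0 (pvStep gj) ((0 : Int), (0 : Int), ([] : List Int))]
  simpa using pvMain gj hpre xs []
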